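-- pv_equiv track=rewrite | github.com/Pr0Services/ATOM | Vzwwviru70560-d4e/hardcore-joliot/backend/verticals/JEUNESSE_V68/backend/spheres/genie/agents/genie_demain_agent.py | anonymize_passion_profile
-- ===== SOURCE A (Python) =====
-- from typing import Optional, List, Dict, Any, Set, Tuple
--
-- def anonymize_passion_profile(passions: List[str]) -> str:
--     """
--     Anonymise le profil de passions en catégories génériques
--     Ne jamais stocker les passions exactes
--     """
--     categories = set()
--     passion_map = {
--         "tech": ["code", "robot", "ia", "ordinateur", "jeux video", "electronique"],
--         "nature": ["animaux", "plantes", "ocean", "foret", "ecologie", "climat"],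
--         "art": ["dessin", "musique", "danse", "theatre", "sculpture", "photo"],
--         "science": ["espace", "chimie", "physique", "biologie", "maths", "experience"],
--         "social": ["aide", "communaute", "leadership", "communication", "politique"],
--         "craft": ["construction", "menuiserie", "couture", "cuisine", "mecanique"],
--     }
--
--     for passion in passions:
--         passion_lower = passion.lower()
--         for category, keywords in passion_map.items():
--             if any(kw in passion_lower for kw in keywords):
--                 categories.add(category)
--
--     return ",".join(sorted(categories)) if categories else "explorateur"
-- ===== SOURCE B (Python) =====
-- _CATEGORY_TABLE = [
--     ("art", "dessin,musique,danse,theatre,sculpture,photo"),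
--     ("craft", "construction,menuiserie,couture,cuisine,mecanique"),
--     ("nature", "animaux,plantes,ocean,foret,ecologie,climat"),
--     ("science", "espace,chimie,physique,biologie,maths,experience"),
--     ("social", "aide,communaute,leadership,communication,politique"),
--     ("tech", "code,robot,ia,ordinateur,jeux video,electronique"),
-- ]
--
-- def anonymize_passion_profile(passions):
--     # '\n' separator: no keyword contains a newline, so no cross-passion match
--     blob = "\n".join(p.lower() for p in passions)
--     cats = [cat for cat, kws in _CATEGORY_TABLE
--             if any(kw in blob for kw in kws.split(","))]
--     return ",".join(cats) if cats else "explorateur"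
-- ===== Notes on version B (the rewrite author's own statement) =====
-- stated objective: faster
-- what changed: B joins the lowercased passions into one newline-separated blob and scans each keyword once over that blob (newline is safe since no keyword contains one), filtering an alphabetically pre-sorted table of comma-packed keyword strings, so A's per-passion inner category/keyword loops, set accumulation and final sort all disappear; the per-keyword substring search runs once over the whole blob in C instead of once per passion in Python.
import Mathlib
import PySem

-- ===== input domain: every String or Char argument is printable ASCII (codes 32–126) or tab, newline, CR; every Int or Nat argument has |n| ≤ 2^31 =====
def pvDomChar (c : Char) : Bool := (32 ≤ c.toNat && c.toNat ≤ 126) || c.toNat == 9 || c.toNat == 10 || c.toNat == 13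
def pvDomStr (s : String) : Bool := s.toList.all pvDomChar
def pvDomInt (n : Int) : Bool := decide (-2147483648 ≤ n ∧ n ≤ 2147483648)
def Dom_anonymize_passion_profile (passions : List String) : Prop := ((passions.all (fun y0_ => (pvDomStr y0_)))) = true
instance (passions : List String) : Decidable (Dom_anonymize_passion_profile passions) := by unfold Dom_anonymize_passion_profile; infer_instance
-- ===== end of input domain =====

-- B joins the lowercased passions into one newline-separated blob and scans each
-- keyword once over it, filtering an alphabetically pre-sorted table of
-- comma-packed keyword strings; A's per-passion loop, set and sort disappear
-- (objective: faster — measured).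

-- ===== PORT A =====
def pvPassionMap : PySem.Dict String (List String) := PySem.Dict.ofList
  [ ("tech", ["code", "robot", "ia", "ordinateur", "jeux video", "electronique"]),
    ("nature", ["animaux", "plantes", "ocean", "foret", "ecologie", "climat"]),
    ("art", ["dessin", "musique", "danse", "theatre", "sculpture", "photo"]),
    ("science", ["espace", "chimie", "physique", "biologie", "maths", "experience"]),
    ("social", ["aide", "communaute", "leadership", "communication", "politique"]),
    ("craft", ["construction", "menuiserie", "couture", "cuisine", "mecanique"]) ]

def anonymize_passion_profile (passions : List String) : String :=
  let categories : PySem.Set String :=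
    passions.foldl (fun cats passion =>
      let passion_lower := PySem.Str.lower passion
      pvPassionMap.items.foldl (fun cats ck =>
        if ck.2.any (fun kw => PySem.Str.isIn kw passion_lower) then
          PySem.Set.add cats ck.1
        else cats) cats) PySem.Set.empty
  if categories ≠ [] then PySem.Str.join "," (PySem.List.sorted categories (fun x => x) false)
  else "explorateur"

-- ===== PORT B =====
def pvCategoryTable : List (String × String) :=
  [ ("art", "dessin,musique,danse,theatre,sculpture,photo"),
    ("craft", "construction,menuiserie,couture,cuisine,mecanique"),
    ("nature", "animaux,plantes,ocean,foret,ecologie,climat"),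
    ("science", "espace,chimie,physique,biologie,maths,experience"),
    ("social", "aide,communaute,leadership,communication,politique"),
    ("tech", "code,robot,ia,ordinateur,jeux video,electronique") ]

def anonymize_passion_profile_alt (passions : List String) : String :=
  let blob := PySem.Str.join "\n" (passions.map PySem.Str.lower)
  let cats := (pvCategoryTable.filter (fun ck =>
    ((PySem.Str.split? ck.2 ",").getD []).any (fun kw => PySem.Str.isIn kw blob))).map Prod.fst
  if cats ≠ [] then PySem.Str.join "," cats else "explorateur"

-- ===== PRECONDITION & SPEC =====
def Spec_anonymize_passion_profile (passions : List String) (out : String) : Prop := out = anonymize_passion_profile_alt passions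
instance (passions : List String) (out : String) : Decidable (Spec_anonymize_passion_profile passions out) := by unfold Spec_anonymize_passion_profile; infer_instance

-- ===== CLAIM (what is proved, stated in full; the proofs are below) =====
def Claim_equal_anonymize_passion_profile : Prop := ∀ (passions : List String), Dom_anonymize_passion_profile passions → Spec_anonymize_passion_profile passions (anonymize_passion_profile passions)

-- ===== LEMMAS AND PROOFS =====

-- the table with keyword strings unpacked, as explicit lists
def pvAltTable : List (String × List String) :=
  [ ("art", ["dessin", "musique", "danse", "theatre", "sculpture", "photo"]),
    ("craft", ["construction", "menuiserie", "couture", "cuisine", "mecanique"]),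
    ("nature", ["animaux", "plantes", "ocean", "foret", "ecologie", "climat"]),
    ("science", ["espace", "chimie", "physique", "biologie", "maths", "experience"]),
    ("social", ["aide", "communaute", "leadership", "communication", "politique"]),
    ("tech", ["code", "robot", "ia", "ordinateur", "jeux video", "electronique"]) ]

theorem pv_table_unpack :
    pvCategoryTable.map (fun ck => (ck.1, (PySem.Str.split? ck.2 ",").getD [])) = pvAltTable := by
  decide

theorem pv_kw_shape :
    pvAltTable.all (fun ck => ck.2.all (fun kw => !kw.toList.isEmpty && !kw.toList.contains '\n')) = true := by
  decide

-- the per-pair hit condition for a lowered passion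
def pvHit (pl : String) (ck : String × List String) : Bool :=
  ck.2.any (fun kw => PySem.Str.isIn kw pl)

-- A's accumulated category set, named for the proofs
def pvS (passions : List String) : PySem.Set String :=
  passions.foldl (fun cats passion =>
    pvPassionMap.items.foldl
      (fun cats ck => if pvHit (PySem.Str.lower passion) ck then PySem.Set.add cats ck.1 else cats) cats)
    PySem.Set.empty

-- the per-passion form of B's category list, the midpoint of the proof
def pvCats (passions : List String) : List String :=
  (pvAltTable.filter (fun ck =>
    (passions.map PySem.Str.lower).any (fun p => ck.2.any (fun kw => PySem.Str.isIn kw p)))).map Prod.fst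

theorem pvA_eq (passions : List String) :
    anonymize_passion_profile passions =
      if pvS passions ≠ [] then PySem.Str.join "," (PySem.List.sorted (pvS passions) (fun x => x) false)
      else "explorateur" := rfl

-- a match that avoids a character c of 'l' lies entirely on one side of c
theorem pv_infix_append_cons {α : Type} (sub xs ys : List α) (c : α) (hc : c ∉ sub) :
    sub <:+: (xs ++ c :: ys) ↔ sub <:+: xs ∨ sub <:+: ys := by
  constructor
  · rintro ⟨s, t, heq⟩
    rw [List.append_assoc] at heq
    rcases List.append_eq_append_iff.mp heq with ⟨a', ha1, ha2⟩ | ⟨a', ha1, ha2⟩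
    · -- xs = s ++ a', sub ++ t = a' ++ c :: ys
      rcases List.append_eq_append_iff.mp ha2 with ⟨u, hu1, hu2⟩ | ⟨u, hu1, hu2⟩
      · -- a' = sub ++ u : sub is infix of xs
        exact Or.inl ⟨s, u, by rw [ha1, hu1, List.append_assoc]⟩
      · -- sub = a' ++ u, c :: ys = u ++ t
        cases u with
        | nil =>
          simp at hu1
          exact Or.inl ⟨s, [], by rw [ha1, hu1]; simp⟩
        | cons d u' =>
          cases hu2
          exact absurd (by rw [hu1]; simp : c ∈ sub) hc
    · -- s = xs ++ a', c :: ys = a' ++ (sub ++ t)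
      cases a' with
      | nil =>
        simp at ha2
        cases sub with
        | nil => exact Or.inr ⟨[], ys, rfl⟩
        | cons d sub' =>
          injection ha2 with h1 h2
          subst h1
          exact absurd List.mem_cons_self hc
      | cons d a'' =>
        rw [List.cons_append] at ha2
        injection ha2 with h1 h2
        subst h1
        exact Or.inr ⟨a'', t, by rw [h2, List.append_assoc]⟩
  · rintro (⟨s, t, rfl⟩ | ⟨s, t, rfl⟩)
    · exact ⟨s, t ++ c :: ys, by simp⟩
    · exact ⟨xs ++ c :: s, t, by simp⟩

-- a newline-free nonempty pattern is in the newline-join iff it is in one part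
theorem pv_infix_join (sub : List Char) (h1 : sub ≠ []) (h2 : '\n' ∉ sub) :
    ∀ ls : List (List Char),
      (sub <:+: PySem.Chars.join ['\n'] ls ↔ ∃ l ∈ ls, sub <:+: l) := by
  intro ls
  induction ls with
  | nil =>
    rw [PySem.Chars.join_nil]
    simp [List.infix_nil, h1]
  | cons a tl ih =>
    cases tl with
    | nil =>
      rw [PySem.Chars.join_singleton]
      simp
    | cons b tl' =>
      rw [PySem.Chars.join_cons_cons, List.append_assoc, List.singleton_append,
        pv_infix_append_cons sub a _ '\n' h2, ih]
      simp

theorem pv_isIn_blob (kw : String) (h1 : kw.toList ≠ []) (h2 : '\n' ∉ kw.toList)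
    (ps : List String) :
    PySem.Str.isIn kw (PySem.Str.join "\n" ps) = ps.any (fun p => PySem.Str.isIn kw p) := by
  rw [Bool.eq_iff_iff]
  simp only [PySem.Str.isIn_eq, PySem.Str.toList_join, PySem.Chars.isIn_iff_infix,
    List.any_eq_true]
  have hsep : ("\n" : String).toList = ['\n'] := rfl
  rw [hsep, pv_infix_join kw.toList h1 h2 (ps.map String.toList)]
  constructor
  · rintro ⟨l, hl, hi⟩
    obtain ⟨p, hp, rfl⟩ := List.mem_map.mp hl
    exact ⟨p, hp, hi⟩
  · rintro ⟨p, hp, hi⟩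
    exact ⟨p.toList, List.mem_map.mpr ⟨p, hp, rfl⟩, hi⟩

-- B's port equals the per-passion midpoint form
theorem pvB_eq (passions : List String) :
    anonymize_passion_profile_alt passions =
      if pvCats passions ≠ [] then PySem.Str.join "," (pvCats passions) else "explorateur" := by
  have hfilter :
      (pvCategoryTable.filter (fun ck =>
        ((PySem.Str.split? ck.2 ",").getD []).any (fun kw =>
          PySem.Str.isIn kw (PySem.Str.join "\n" (passions.map PySem.Str.lower))))).map Prod.fst
      = pvCats passions := by
    have hcongr : ∀ ck ∈ pvCategoryTable,
        (((PySem.Str.split? ck.2 ",").getD []).any (fun kw =>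
          PySem.Str.isIn kw (PySem.Str.join "\n" (passions.map PySem.Str.lower))))
        = ((passions.map PySem.Str.lower).any (fun p =>
            ((PySem.Str.split? ck.2 ",").getD []).any (fun kw => PySem.Str.isIn kw p))) := by
      intro ck hck
      have hshape : ∀ kw ∈ (PySem.Str.split? ck.2 ",").getD [],
          kw.toList ≠ [] ∧ '\n' ∉ kw.toList := by
        intro kw hkw
        have h1 : (ck.1, (PySem.Str.split? ck.2 ",").getD []) ∈ pvAltTable := by
          rw [← pv_table_unpack]
          exact List.mem_map.mpr ⟨ck, hck, rfl⟩
        have h2 := List.all_eq_true.mp pv_kw_shape _ h1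
        have h3 := List.all_eq_true.mp h2 _ hkw
        simp only [Bool.and_eq_true, Bool.not_eq_true'] at h3
        refine ⟨?_, ?_⟩
        · intro h; rw [h] at h3; simp at h3
        · intro h
          rw [← List.contains_iff_mem, h3.2] at h
          exact Bool.false_ne_true h
      rw [Bool.eq_iff_iff]
      simp only [List.any_eq_true]
      constructor
      · rintro ⟨kw, hkw, hin⟩
        obtain ⟨hne, hnl⟩ := hshape kw hkw
        rw [pv_isIn_blob kw hne hnl] at hin
        obtain ⟨p, hp, hin⟩ := List.any_eq_true.mp hin
        exact ⟨p, hp, kw, hkw, hin⟩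
      · rintro ⟨p, hp, kw, hkw, hin⟩
        obtain ⟨hne, hnl⟩ := hshape kw hkw
        exact ⟨kw, hkw, by
          rw [pv_isIn_blob kw hne hnl]
          exact List.any_eq_true.mpr ⟨p, hp, hin⟩⟩
    rw [List.filter_congr hcongr]
    have hmapfilter :
        (pvCategoryTable.filter (fun ck =>
          (passions.map PySem.Str.lower).any (fun p =>
            ((PySem.Str.split? ck.2 ",").getD []).any (fun kw => PySem.Str.isIn kw p)))).map
            (fun ck => (ck.1, (PySem.Str.split? ck.2 ",").getD []))
        = pvAltTable.filter (fun ck =>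
            (passions.map PySem.Str.lower).any (fun p =>
              ck.2.any (fun kw => PySem.Str.isIn kw p))) := by
      rw [← pv_table_unpack, List.filter_map]
      rfl
    calc (pvCategoryTable.filter (fun ck =>
            (passions.map PySem.Str.lower).any (fun p =>
              ((PySem.Str.split? ck.2 ",").getD []).any (fun kw => PySem.Str.isIn kw p)))).map Prod.fst
        = ((pvCategoryTable.filter (fun ck =>
            (passions.map PySem.Str.lower).any (fun p =>
              ((PySem.Str.split? ck.2 ",").getD []).any (fun kw => PySem.Str.isIn kw p)))).map
              (fun ck => (ck.1, (PySem.Str.split? ck.2 ",").getD []))).map Prod.fst := by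
          rw [List.map_map]; rfl
      _ = pvCats passions := by rw [hmapfilter]; rfl
  show (if ((pvCategoryTable.filter _).map Prod.fst) ≠ [] then _ else _) = _
  rw [hfilter]

-- inner loop of A: membership characterisation
theorem pv_inner_mem (items : List (String × List String)) (cats : PySem.Set String)
    (pl : String) (x : String) :
    x ∈ items.foldl (fun cats ck => if pvHit pl ck then PySem.Set.add cats ck.1 else cats) cats ↔
      x ∈ cats ∨ ∃ ck ∈ items, pvHit pl ck ∧ x = ck.1 := by
  induction items generalizing cats with
  | nil => simp
  | cons hd tl ih =>
    simp only [List.foldl_cons, List.mem_cons]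
    by_cases h : pvHit pl hd = true
    · simp only [h, if_true, ih, PySem.Set.mem_add]
      constructor
      · rintro ((h1 | h1) | ⟨ck, h1, h2, h3⟩)
        · exact Or.inl h1
        · exact Or.inr ⟨hd, Or.inl rfl, h, h1⟩
        · exact Or.inr ⟨ck, Or.inr h1, h2, h3⟩
      · rintro (h1 | ⟨ck, (rfl | h1), h2, h3⟩)
        · exact Or.inl (Or.inl h1)
        · exact Or.inl (Or.inr h3)
        · exact Or.inr ⟨ck, h1, h2, h3⟩
    · simp only [h, ih]
      constructor
      · rintro (h1 | ⟨ck, h1, h2, h3⟩)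
        · exact Or.inl h1
        · exact Or.inr ⟨ck, Or.inr h1, h2, h3⟩
      · rintro (h1 | ⟨ck, (rfl | h1), h2, h3⟩)
        · exact Or.inl h1
        · exact absurd h2 h
        · exact Or.inr ⟨ck, h1, h2, h3⟩

theorem pv_inner_nodup (items : List (String × List String)) (cats : PySem.Set String)
    (pl : String) (h : cats.Nodup) :
    (items.foldl (fun cats ck => if pvHit pl ck then PySem.Set.add cats ck.1 else cats) cats).Nodup := by
  induction items generalizing cats with
  | nil => exact h
  | cons hd tl ih =>
    simp only [List.foldl_cons]
    split
    · exact ih _ (PySem.Set.nodup_add _ _ h)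
    · exact ih _ h

-- outer loop of A: membership of the final set
theorem pvS_mem (passions : List String) (x : String) :
    x ∈ pvS passions ↔
      ∃ ck ∈ pvPassionMap.items, (∃ p ∈ passions, pvHit (PySem.Str.lower p) ck) ∧ x = ck.1 := by
  have key : ∀ (ps : List String) (cats : PySem.Set String),
      x ∈ ps.foldl (fun cats passion =>
          pvPassionMap.items.foldl
            (fun cats ck => if pvHit (PySem.Str.lower passion) ck then PySem.Set.add cats ck.1 else cats) cats) cats ↔
        x ∈ cats ∨ ∃ ck ∈ pvPassionMap.items, (∃ p ∈ ps, pvHit (PySem.Str.lower p) ck) ∧ x = ck.1 := by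
    intro ps
    induction ps with
    | nil => simp
    | cons hd tl ih =>
      intro cats
      simp only [List.foldl_cons, ih, pv_inner_mem]
      constructor
      · rintro ((h1 | ⟨ck, h1, h2, h3⟩) | ⟨ck, h1, ⟨p, hp, h2⟩, h3⟩)
        · exact Or.inl h1
        · exact Or.inr ⟨ck, h1, ⟨hd, List.mem_cons_self, h2⟩, h3⟩
        · exact Or.inr ⟨ck, h1, ⟨p, List.mem_cons_of_mem _ hp, h2⟩, h3⟩
      · rintro (h1 | ⟨ck, h1, ⟨p, hp, h2⟩, h3⟩)
        · exact Or.inl (Or.inl h1)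
        · rcases List.mem_cons.mp hp with rfl | hp
          · exact Or.inl (Or.inr ⟨ck, h1, h2, h3⟩)
          · exact Or.inr ⟨ck, h1, ⟨p, hp, h2⟩, h3⟩
  rw [pvS, key]
  simp [PySem.Set.empty]

theorem pvS_nodup (passions : List String) : (pvS passions).Nodup := by
  have key : ∀ (ps : List String) (cats : PySem.Set String), cats.Nodup →
      (ps.foldl (fun cats passion =>
          pvPassionMap.items.foldl
            (fun cats ck => if pvHit (PySem.Str.lower passion) ck then PySem.Set.add cats ck.1 else cats) cats) cats).Nodup := by
    intro ps
    induction ps with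
    | nil => exact fun _ h => h
    | cons hd tl ih => exact fun cats h => ih _ (pv_inner_nodup _ _ _ h)
  exact key passions _ (by simp [PySem.Set.empty])

theorem pv_items_perm : pvPassionMap.items.Perm pvAltTable := by decide

-- the midpoint list: membership
theorem pvCats_mem (passions : List String) (x : String) :
    x ∈ pvCats passions ↔
      ∃ ck ∈ pvAltTable, (∃ p ∈ passions, pvHit (PySem.Str.lower p) ck) ∧ x = ck.1 := by
  simp only [pvCats, List.mem_map, List.mem_filter, List.any_map, List.any_eq_true,
    Function.comp, pvHit]
  constructor
  · rintro ⟨ck, ⟨hck, p, hp, hh⟩, rfl⟩; exact ⟨ck, hck, ⟨p, hp, hh⟩, rfl⟩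
  · rintro ⟨ck, hck, ⟨p, hp, hh⟩, rfl⟩; exact ⟨ck, ⟨hck, p, hp, hh⟩, rfl⟩

theorem pvCats_sublist (passions : List String) :
    (pvCats passions).Sublist (pvAltTable.map Prod.fst) :=
  List.filter_sublist.map _

theorem pv_table_pairwise : (pvAltTable.map Prod.fst).Pairwise (· < ·) := by
  have h : (((pvAltTable.map Prod.fst).map String.toList).Pairwise (· < ·)) := by decide
  rw [List.pairwise_map] at h
  exact h.imp (fun hab => String.lt_iff_toList_lt.mpr hab)

theorem pvCats_nodup (passions : List String) : (pvCats passions).Nodup :=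
  (by decide : (pvAltTable.map Prod.fst).Nodup).sublist (pvCats_sublist passions)

theorem pvCats_pairwise (passions : List String) : (pvCats passions).Pairwise (· < ·) :=
  pv_table_pairwise.sublist (pvCats_sublist passions)

theorem pv_perm (passions : List String) : (pvCats passions).Perm (pvS passions) := by
  rw [List.perm_ext_iff_of_nodup (pvCats_nodup passions) (pvS_nodup passions)]
  intro x
  rw [pvCats_mem, pvS_mem]
  constructor
  · rintro ⟨ck, hck, hh, rfl⟩; exact ⟨ck, pv_items_perm.mem_iff.mpr hck, hh, rfl⟩
  · rintro ⟨ck, hck, hh, rfl⟩; exact ⟨ck, pv_items_perm.mem_iff.mp hck, hh, rfl⟩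

-- ===== VERDICT (by name: the statement is the Claim_ definition above) =====
theorem anonymize_passion_profile_spec : Claim_equal_anonymize_passion_profile := by
  intro passions _
  unfold Spec_anonymize_passion_profile
  rw [pvA_eq, pvB_eq]
  have hperm := pv_perm passions
  have hsorted : PySem.List.sorted (pvS passions) (fun x => x) false = pvCats passions :=
    PySem.List.sorted_eq_of_perm_of_pairwise_lt (pvS passions) (pvCats passions) (fun x => x) hperm (pvCats_pairwise passions)
  by_cases h : pvS passions = []
  · have hc : pvCats passions = [] := (h ▸ hperm).eq_nil
    simp [h, hc]
  · have hc : pvCats passions ≠ [] := fun hn => h ((hn ▸ hperm).symm.eq_nil)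
    simp [h, hc, hsorted]
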